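-- pv_equiv track=rewrite | github.com/GreenMemory16/FP-2021-2022 | Project 1/Code.py | estrutura_da_cifra
-- ===== SOURCE A (Python) =====
-- def estrutura_da_cifra(arg):
--     """
--     estrutura_da_cifra: lista
--
--     Verifica os possíveis erros específicos para a cifra, retornando True se
--     houver algo não aceite
--     """
--     # Verifica se a string do elemento 0 é vazia ou se é só um traço ou começa ou acaba num traço
--     if arg == "" or arg.startswith("-") or arg.endswith("-"):
--         return True
--
--     antes = ""
--     for i in arg:
--         if i == "-" and antes == "-":  # Verifica se há dois traços seguidos
--             return True
--         if not (i.isalpha() and 97 <= ord(i) <= 122) and i != "-":  # Verifica se é letra minúscula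
--             return True
--         antes = i
--
--     return False
-- ===== SOURCE B (Python) =====
-- def estrutura_da_cifra(arg):
--     """
--     Split-then-check decomposition: valid iff every '-'-separated token is
--     nonempty and consists only of lowercase ASCII letters.
--     """
--     parts = arg.split('-')
--     ok = all(parts) and all(97 <= ord(c) <= 122 for part in parts for c in part)
--     return not ok
-- ===== Notes on version B (the rewrite author's own statement) =====
-- stated objective: simpler
-- what changed: Replaces the stateful previous-character scan plus separate empty/leading/trailing-dash guards by a split('-') into tokens followed by two uniform checks (no empty token, all token characters lowercase ASCII).
import Mathlib
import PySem

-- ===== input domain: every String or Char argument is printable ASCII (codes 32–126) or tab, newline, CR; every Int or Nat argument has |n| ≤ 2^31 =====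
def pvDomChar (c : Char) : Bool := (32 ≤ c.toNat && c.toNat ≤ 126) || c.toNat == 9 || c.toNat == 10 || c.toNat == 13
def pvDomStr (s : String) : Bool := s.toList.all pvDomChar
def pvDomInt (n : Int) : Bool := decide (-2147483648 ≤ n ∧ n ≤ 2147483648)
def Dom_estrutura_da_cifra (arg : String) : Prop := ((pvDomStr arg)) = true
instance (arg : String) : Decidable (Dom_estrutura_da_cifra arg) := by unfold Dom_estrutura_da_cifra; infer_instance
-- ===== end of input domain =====

-- B replaces A's stateful previous-character scan by split('-')-then-check-tokens; objective: simpler.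

-- ===== PORT A =====
-- the for-loop of A: state 'antes' is the previously seen character as a string (list of chars, [] = "")
def estrutura_da_cifra_loop : List Char → List Char → Bool
  | [], _ => false
  | i :: rest, antes =>
    if i == '-' && antes == ['-'] then true
    else if !(PySem.Chars.isalpha i && (decide (97 ≤ i.toNat) && decide (i.toNat ≤ 122))) && !(i == '-') then true
    else estrutura_da_cifra_loop rest [i]

def estrutura_da_cifra (arg : String) : Bool :=
  if arg == "" || PySem.Str.startswith arg "-" || PySem.Str.endswith arg "-" then true
  else estrutura_da_cifra_loop arg.toList []

-- ===== PORT B =====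
def estrutura_da_cifra_alt (arg : String) : Bool :=
  let parts := PySem.Chars.splitOn arg.toList ['-']
  !(parts.all (fun p => !p.isEmpty) &&
    parts.all (fun p => p.all (fun c => decide (97 ≤ c.toNat) && decide (c.toNat ≤ 122))))

-- ===== PRECONDITION & SPEC =====
def Spec_estrutura_da_cifra (arg : String) (out : Bool) : Prop := out = estrutura_da_cifra_alt arg
instance (arg : String) (out : Bool) : Decidable (Spec_estrutura_da_cifra arg out) := by unfold Spec_estrutura_da_cifra; infer_instance

-- ===== CLAIM (what is proved, stated in full; the proofs are below) =====
def Claim_equal_estrutura_da_cifra : Prop := ∀ (arg : String), Dom_estrutura_da_cifra arg → Spec_estrutura_da_cifra arg (estrutura_da_cifra arg)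

-- ===== LEMMAS AND PROOFS =====

-- a lowercase ASCII letter
def pvGood (c : Char) : Bool := decide (97 ≤ c.toNat) && decide (c.toNat ≤ 122)

-- character ok for A's loop: lowercase letter or dash
def pvAllOk (l : List Char) : Bool := l.all (fun c => pvGood c || c == '-')

-- no two consecutive dashes
def pvNoDD : List Char → Bool
  | [] => true
  | c :: rest => (!(c == '-') || !(rest.head? == some '-')) && pvNoDD rest

-- recursive model of split on a single '-'
def pvSplit : List Char → List (List Char)
  | [] => [[]]
  | c :: rest => if c = '-' then [] :: pvSplit rest else (pvSplit rest).modifyHead (c :: ·)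

def pvTokOK (p : List Char) : Bool := !p.isEmpty && p.all pvGood

-- first-token-emptiness-exempt check
def pvN (l : List Char) : Bool := ((pvSplit l).headD []).all pvGood && (pvSplit l).tail.all pvTokOK

lemma pvSplit_ne_nil (l : List Char) : pvSplit l ≠ [] := by
  cases l with
  | nil => simp [pvSplit]
  | cons c rest =>
    simp only [pvSplit]
    split
    · simp
    · cases h : pvSplit rest with
      | nil => exact absurd h (pvSplit_ne_nil rest)
      | cons a t => simp [h]

lemma pv_go_eq (fuel : Nat) (l cur : List Char) (acc : List (List Char)) (h : l.length ≤ fuel) :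
    PySem.Chars.splitOn.go ['-'] fuel l cur acc
      = acc.reverse ++ (pvSplit l).modifyHead (cur.reverse ++ ·) := by
  induction fuel generalizing l cur acc with
  | zero =>
    interval_cases hl : l.length
    · have : l = [] := List.length_eq_zero_iff.mp hl
      subst this
      simp [PySem.Chars.splitOn.go, pvSplit]
  | succ n ih =>
    cases l with
    | nil => simp [PySem.Chars.splitOn.go, pvSplit]
    | cons c rest =>
      by_cases hc : c = '-'
      · subst hc
        have hpre : List.isPrefixOf ['-'] ('-' :: rest) = true := by simp [List.isPrefixOf]
        rw [PySem.Chars.splitOn.go]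
        simp only [hpre, if_pos]
        have : List.drop (List.length ['-']) ('-' :: rest) = rest := by simp
        rw [this, ih rest [] (cur.reverse :: acc) (by simpa using Nat.le_of_succ_le_succ h)]
        cases hsp : pvSplit rest with
        | nil => exact absurd hsp (pvSplit_ne_nil rest)
        | cons a t => simp [pvSplit, hsp, List.modifyHead]
      · have hpre : List.isPrefixOf ['-'] (c :: rest) = false := by
          simp [List.isPrefixOf]; exact fun h' => hc h'.symm
        rw [PySem.Chars.splitOn.go]
        simp only [hpre]
        rw [if_neg (by simp [hpre])]
        rw [ih rest (c :: cur) acc (by simpa using Nat.le_of_succ_le_succ h)]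
        simp only [pvSplit, if_neg hc]
        congr 1
        cases hsp : pvSplit rest with
        | nil => exact absurd hsp (pvSplit_ne_nil rest)
        | cons a t => simp [List.modifyHead]

lemma pv_splitOn_eq (l : List Char) : PySem.Chars.splitOn l ['-'] = pvSplit l := by
  rw [PySem.Chars.splitOn, pv_go_eq (l.length + 1) l [] [] (by omega)]
  cases h : pvSplit l with
  | nil => exact absurd h (pvSplit_ne_nil l)
  | cons a t => simp [List.modifyHead]

-- all-tokens check in terms of pvN
lemma pv_allTok (l : List Char) :
    (pvSplit l).all pvTokOK = (!l.isEmpty && !(l.head? == some '-') && pvN l) := by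
  cases l with
  | nil => simp [pvSplit, pvTokOK, pvN]
  | cons c rest =>
    by_cases hc : c = '-'
    · subst hc; simp [pvSplit, pvTokOK, pvN]
    · cases hsp : pvSplit rest with
      | nil => exact absurd hsp (pvSplit_ne_nil rest)
      | cons a t =>
        have hcb : (c == '-') = false := by simpa using hc
        simp [pvSplit, hc, hsp, pvTokOK, pvN, hcb, Bool.and_assoc, Bool.and_left_comm]

lemma pv_N_spec (l : List Char) :
    pvN l = (!(l.getLast? == some '-') && pvNoDD l && pvAllOk l) := by
  induction l with
  | nil => simp [pvN, pvSplit, pvNoDD, pvAllOk]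
  | cons c rest ih =>
    by_cases hc : c = '-'
    · subst hc
      have h1 : pvN ('-' :: rest) = (pvSplit rest).all pvTokOK := by
        simp [pvN, pvSplit]
      rw [h1, pv_allTok, ih]
      cases rest with
      | nil => simp [pvNoDD, pvAllOk]
      | cons d r =>
        simp [pvNoDD, pvAllOk, List.getLast?_cons_cons, Bool.and_assoc, Bool.and_left_comm]
    · cases hsp : pvSplit rest with
      | nil => exact absurd hsp (pvSplit_ne_nil rest)
      | cons a t =>
        have h1 : pvN (c :: rest) = (pvGood c && pvN rest) := by
          simp [pvN, pvSplit, if_neg hc, hsp, Bool.and_assoc]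
        rw [h1, ih]
        have hcb : (c == '-') = false := by simpa using hc
        cases rest with
        | nil => simp [pvNoDD, pvAllOk, hcb]
        | cons d r =>
          simp [pvNoDD, pvAllOk, List.getLast?_cons_cons, hcb, Bool.and_assoc, Bool.and_left_comm]

-- the letter test in A collapses to the lowercase range test
lemma pv_alpha_range (i : Char) :
    (PySem.Chars.isalpha i && (decide (97 ≤ i.toNat) && decide (i.toNat ≤ 122))) = pvGood i := by
  have hle : ∀ a b : Char, a ≤ b ↔ a.toNat ≤ b.toNat := by
    intro a b
    rw [Char.le_def, UInt32.le_iff_toNat_le]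
    exact Iff.rfl
  have hlow : ('a' ≤ i ∧ i ≤ 'z') ↔ (97 ≤ i.toNat ∧ i.toNat ≤ 122) := by
    rw [hle, hle]
    exact Iff.rfl
  by_cases h : (97 ≤ i.toNat ∧ i.toNat ≤ 122)
  · have hl : PySem.Chars.islower i = true := by
      simp only [PySem.Chars.islower, Bool.and_eq_true, decide_eq_true_eq]
      exact hlow.mpr h
    have hd1 : decide (97 ≤ i.toNat) = true := decide_eq_true h.1
    have hd2 : decide (i.toNat ≤ 122) = true := decide_eq_true h.2
    unfold PySem.Chars.isalpha pvGood
    rw [hl, hd1, hd2]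
    simp
  · have : ¬ (97 ≤ i.toNat) ∨ ¬ (i.toNat ≤ 122) := by omega
    rcases this with h1 | h1
    · have hd : decide (97 ≤ i.toNat) = false := decide_eq_false h1
      unfold pvGood
      rw [hd]
      simp
    · have hd : decide (i.toNat ≤ 122) = false := decide_eq_false h1
      unfold pvGood
      rw [hd]
      simp

lemma pv_loop_spec (l : List Char) (a : List Char) :
    estrutura_da_cifra_loop l a
      = !((!(a == ['-']) || !(l.head? == some '-')) && pvNoDD l && pvAllOk l) := by
  induction l generalizing a with
  | nil => simp [estrutura_da_cifra_loop, pvNoDD, pvAllOk]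
  | cons i rest ih =>
    rw [estrutura_da_cifra_loop]
    by_cases h1 : (i == '-' && a == ['-']) = true
    · rw [if_pos h1]
      rcases (by simpa using h1 : i = '-' ∧ a = ['-']) with ⟨hi, ha⟩
      simp [hi, ha]
    · rw [if_neg h1]
      rw [pv_alpha_range]
      by_cases h2 : (!pvGood i && !(i == '-')) = true
      · rw [if_pos h2]
        have : (pvGood i || i == '-') = false := by
          simp at h2; simp [h2.1, h2.2]
        simp [pvAllOk, this]
      · rw [if_neg h2]
        rw [ih [i]]
        have h2' : pvGood i = true ∨ (i == '-') = true := by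
          rcases Bool.eq_false_or_eq_true (pvGood i) with hh | hh
          · exact Or.inl hh
          · rcases Bool.eq_false_or_eq_true (i == '-') with hh2 | hh2
            · exact Or.inr hh2
            · exact absurd (by simp [hh, hh2]) h2
        simp only [pvNoDD, pvAllOk, List.all_cons]
        by_cases hi : i = '-'
        · subst hi
          have ha : (a == ['-']) = false := by
            by_contra hx
            simp only [Bool.not_eq_false, beq_iff_eq] at hx
            subst hx
            simp at h1
          simp [ha, Bool.and_assoc]
        · have hib : (i == '-') = false := by simpa using hi
          have hg : pvGood i = true := h2'.resolve_right (by simp [hib])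
          simp [hib, hg]

-- ['-'] is a prefix iff the head is '-'; a suffix iff the last is '-'
lemma pv_prefix_dash (l : List Char) : List.isPrefixOf ['-'] l = (l.head? == some '-') := by
  cases l with
  | nil => simp [List.isPrefixOf]
  | cons c rest => simp [List.isPrefixOf, BEq.comm]

lemma pv_suffix_dash (l : List Char) : List.isSuffixOf ['-'] l = (l.getLast? == some '-') := by
  rw [List.isSuffixOf]
  simp only [List.reverse_singleton]
  rw [pv_prefix_dash, List.getLast?_eq_head?_reverse]

lemma pv_all_and (parts : List (List Char)) :
    (parts.all (fun p => !p.isEmpty) && parts.all (fun p => p.all pvGood)) = parts.all pvTokOK := by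
  induction parts with
  | nil => simp
  | cons p t ih =>
    simp only [List.all_cons, pvTokOK, ← ih]
    cases (!p.isEmpty) <;> cases p.all pvGood <;>
      cases t.all (fun p => !p.isEmpty) <;> cases t.all (fun p => p.all pvGood) <;> simp

-- ===== VERDICT (by name: the statement is the Claim_ definition above) =====
theorem estrutura_da_cifra_spec : Claim_equal_estrutura_da_cifra := by
  intro arg _
  unfold Spec_estrutura_da_cifra estrutura_da_cifra
  simp only [estrutura_da_cifra_alt]
  rw [pv_splitOn_eq]
  rw [show (fun c : Char => decide (97 ≤ c.toNat) && decide (c.toNat ≤ 122)) = pvGood from rfl,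
    pv_all_and, pv_allTok, pv_N_spec]
  have hempty : (arg == "") = arg.toList.isEmpty := by
    by_cases h : arg = ""
    · subst h
      decide
    · have h2 : arg.toList ≠ [] := by simpa using h
      have e1 : (arg == "") = false := beq_eq_false_iff_ne.mpr h
      have e2 : arg.toList.isEmpty = false := by simpa using h2
      rw [e1, e2]
  have hsw : PySem.Str.startswith arg "-" = (arg.toList.head? == some '-') := by
    simpa [PySem.Chars.startswith] using pv_prefix_dash arg.toList
  have hew : PySem.Str.endswith arg "-" = (arg.toList.getLast? == some '-') := by
    simpa [PySem.Chars.endswith] using pv_suffix_dash arg.toList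
  rw [hempty, hsw, hew, pv_loop_spec]
  rcases Bool.eq_false_or_eq_true arg.toList.isEmpty with hE | hE <;>
    rcases Bool.eq_false_or_eq_true (arg.toList.head? == some '-') with hH | hH <;>
      rcases Bool.eq_false_or_eq_true (arg.toList.getLast? == some '-') with hL | hL <;>
        simp [hE, hH, hL]
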